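-- pv_equiv track=rewrite | github.com/Dhliwayo6/Python-Practice | python_practice.py | month_days
-- ===== SOURCE A (Python) =====
-- def month_days(month):
--
--     months = {'january': '31',
--               'february': '28',
--               'march': '31',
--               'april': '30',
--               'may': '31',
--               'june': '30',
--               'july': '31',
--               'august': '31',
--               'september': '30',
--               'october': '31',
--               'november': '30',
--               'december': '31'}
--     shortHand = {}
--     for fullName, days in months.items():
--         shortHand[fullName[:3]] = days
--
--     month = month.casefold()
--
--     if month in months:
--         return months[month]
--     elif month[:3] in shortHand:
--         return shortHand[month[:3]]
--     else:
--         return 'Not a valid month'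
-- ===== SOURCE B (Python) =====
-- def month_days(month):
--     p = month.casefold()[:3]
--     if p == 'feb':
--         return '28'
--     if p in ('apr', 'jun', 'sep', 'nov'):
--         return '30'
--     if p in ('jan', 'mar', 'may', 'jul', 'aug', 'oct', 'dec'):
--         return '31'
--     return 'Not a valid month'
-- ===== Notes on version B (the rewrite author's own statement) =====
-- stated objective: simpler
-- what changed: Drops both dicts (full-name map plus the loop-built prefix map) and the three-branch dict-lookup chain: B classifies the 3-letter casefolded prefix by day count (feb -> 28, the four 30-day prefixes, the seven 31-day prefixes, else the error string) via plain membership tests; correct because the twelve prefixes are distinct and every full name agrees with its prefix's value.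
import Mathlib
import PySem

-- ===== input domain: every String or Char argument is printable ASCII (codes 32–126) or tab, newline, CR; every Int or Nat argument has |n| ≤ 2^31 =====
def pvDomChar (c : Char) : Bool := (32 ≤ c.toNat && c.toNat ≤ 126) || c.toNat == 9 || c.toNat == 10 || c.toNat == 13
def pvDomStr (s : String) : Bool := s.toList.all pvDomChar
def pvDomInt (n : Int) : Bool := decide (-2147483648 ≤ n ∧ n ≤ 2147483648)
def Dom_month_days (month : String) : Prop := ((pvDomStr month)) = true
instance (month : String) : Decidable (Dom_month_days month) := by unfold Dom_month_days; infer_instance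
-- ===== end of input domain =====

-- B drops A's two dicts and three-branch lookup chain: it classifies the 3-letter
-- casefolded prefix by day count (feb / the four 30-day / the seven 31-day prefixes)
-- with plain membership tests — a simpler decomposition with the same value.
-- casefold is ported as PySem.Str.lower, exact on the ASCII domain Dom_month_days.


-- ===== PORT A =====
def pvMonthsA : PySem.Dict String String :=
  PySem.Dict.ofList [("january", "31"), ("february", "28"), ("march", "31"),
                     ("april", "30"), ("may", "31"), ("june", "30"),
                     ("july", "31"), ("august", "31"), ("september", "30"),
                     ("october", "31"), ("november", "30"), ("december", "31")]

-- the 'for fullName, days in months.items(): shortHand[fullName[:3]] = days' loop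
def pvShortHand : PySem.Dict String String :=
  pvMonthsA.items.foldl
    (fun d p => d.insert (PySem.Str.slice p.1 none (some 3)) p.2)
    PySem.Dict.empty

def month_days (month : String) : String :=
  let m := PySem.Str.lower month
  if pvMonthsA.contains m then
    pvMonthsA.getD m ""               -- months[month]: key present in this branch
  else if pvShortHand.contains (PySem.Str.slice m none (some 3)) then
    pvShortHand.getD (PySem.Str.slice m none (some 3)) ""
  else
    "Not a valid month"

-- ===== PORT B =====
def month_days_alt (month : String) : String :=
  let p := PySem.Str.slice (PySem.Str.lower month) none (some 3)
  if p == "feb" then "28"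
  else if ["apr", "jun", "sep", "nov"].contains p then "30"
  else if ["jan", "mar", "may", "jul", "aug", "oct", "dec"].contains p then "31"
  else "Not a valid month"

-- ===== PRECONDITION & SPEC =====
def Spec_month_days (month : String) (out : String) : Prop := out = month_days_alt month
instance (month : String) (out : String) : Decidable (Spec_month_days month out) := by unfold Spec_month_days; infer_instance

-- ===== CLAIM (what is proved, stated in full; the proofs are below) =====
def Claim_equal_month_days : Prop := ∀ (month : String), Dom_month_days month → Spec_month_days month (month_days month)

-- ===== LEMMAS AND PROOFS =====

-- B's if-chain on an arbitrary prefix string p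
def pvBChain (p : String) : String :=
  if p == "feb" then "28"
  else if ["apr", "jun", "sep", "nov"].contains p then "30"
  else if ["jan", "mar", "may", "jul", "aug", "oct", "dec"].contains p then "31"
  else "Not a valid month"

-- A's prefix-dict branch agrees with B's chain on every string p
theorem pv_prefix (p : String) :
    (if pvShortHand.contains p then pvShortHand.getD p "" else "Not a valid month")
    = pvBChain p := by
  by_cases hc : pvShortHand.contains p = true
  · have hk : pvShortHand.keys = ["jan", "feb", "mar", "apr", "may", "jun",
        "jul", "aug", "sep", "oct", "nov", "dec"] := by decide
    have hm := (PySem.Dict.contains_iff_mem_keys _ _).mp hc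
    rw [hk] at hm
    simp only [List.mem_cons, List.not_mem_nil, or_false] at hm
    rcases hm with h | h | h | h | h | h | h | h | h | h | h | h <;> subst h <;> decide
  · have hm : ¬ p ∈ pvShortHand.keys :=
      fun h => hc ((PySem.Dict.contains_iff_mem_keys _ _).mpr h)
    have hk : pvShortHand.keys = ["jan", "feb", "mar", "apr", "may", "jun",
        "jul", "aug", "sep", "oct", "nov", "dec"] := by decide
    rw [hk] at hm
    simp only [List.mem_cons, List.not_mem_nil, or_false, not_or] at hm
    obtain ⟨h1, h2, h3, h4, h5, h6, h7, h8, h9, h10, h11, h12⟩ := hm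
    rw [if_neg hc]
    unfold pvBChain
    rw [if_neg (by simp [h2]),
        if_neg (by simp only [List.contains_cons, List.contains_nil, Bool.or_false,
          Bool.or_eq_true, beq_iff_eq, not_or]; exact ⟨h4, h6, h9, h11⟩),
        if_neg (by simp only [List.contains_cons, List.contains_nil, Bool.or_false,
          Bool.or_eq_true, beq_iff_eq, not_or]; exact ⟨h1, h3, h5, h7, h8, h10, h12⟩)]

-- the core equality for an arbitrary already-casefolded string m
theorem pv_core (m : String) :
    (if pvMonthsA.contains m then pvMonthsA.getD m ""
     else if pvShortHand.contains (PySem.Str.slice m none (some 3)) then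
       pvShortHand.getD (PySem.Str.slice m none (some 3)) ""
     else "Not a valid month")
    = pvBChain (PySem.Str.slice m none (some 3)) := by
  by_cases h : pvMonthsA.contains m = true
  · rw [if_pos h]
    have hk : pvMonthsA.keys = ["january", "february", "march", "april", "may",
        "june", "july", "august", "september", "october", "november", "december"] := by decide
    have hm := (PySem.Dict.contains_iff_mem_keys _ _).mp h
    rw [hk] at hm
    simp only [List.mem_cons, List.not_mem_nil, or_false] at hm
    rcases hm with h | h | h | h | h | h | h | h | h | h | h | h <;> subst h <;> decide
  · rw [if_neg h]
    exact pv_prefix _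

-- ===== VERDICT (by name: the statement is the Claim_ definition above) =====
theorem month_days_spec : Claim_equal_month_days := by
  intro month _
  show month_days month = month_days_alt month
  unfold month_days month_days_alt
  exact pv_core (PySem.Str.lower month)
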